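-- pv_equiv track=rewrite | github.com/Asabe041/AminSaber | Python Applications/University Assignments/a2/a2_part2_300059636.py | nonrepetitive
-- ===== SOURCE A (Python) =====
-- def nonrepetitive(s):
--     """
--     (str)->boolean
--     This functions checks a given string to see if it has the same subword twice in a row and returns True or False
--     wether is true or not
--     """
--     s1=''
--     if len(s)==0 or len(s)==1:
--         return True
--
--     for i in range(0,len(s)):
--         for count in range(1,len(s)+1):
--             s1=s[i:i+count]
--             if s1==s[i+count:2*count+i]:
--                 return False
--
--
--     return True
-- ===== SOURCE B (Python) =====
-- def nonrepetitive(s):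
--     n = len(s)
--     for d in range(1, n // 2 + 1):
--         run = 0
--         best = 0
--         for k in range(n - d):
--             run = run + 1 if s[k] == s[k + d] else 0
--             best = max(best, run)
--         if best >= d:
--             return False
--     return True
-- ===== Notes on version B (the rewrite author's own statement) =====
-- stated objective: faster
-- what changed: Replaced the triple-nested slice-building-and-comparing scan (every start, every length, O(n) slice compare) by a shift-scan: for each candidate half-length d one linear pass counts runs of positions k with s[k]==s[k+d]; a run of length >= d is exactly a square of half-length 2d, and d only needs to go up to n//2.
import Mathlib
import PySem

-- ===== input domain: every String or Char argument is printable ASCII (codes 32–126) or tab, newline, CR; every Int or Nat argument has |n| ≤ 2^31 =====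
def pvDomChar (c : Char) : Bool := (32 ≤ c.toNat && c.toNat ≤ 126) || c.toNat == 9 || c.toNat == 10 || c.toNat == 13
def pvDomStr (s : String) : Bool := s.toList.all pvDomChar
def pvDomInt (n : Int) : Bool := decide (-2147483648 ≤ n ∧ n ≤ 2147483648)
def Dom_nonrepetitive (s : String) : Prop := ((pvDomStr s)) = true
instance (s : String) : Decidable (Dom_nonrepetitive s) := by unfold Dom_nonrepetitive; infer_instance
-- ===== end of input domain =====

-- B replaces A's triple-nested slice comparison by one run-counting pass per candidate
-- half-length d ≤ n/2 (a square of half-length d ⇔ d consecutive positions k with s[k]=s[k+d]).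

-- ===== PORT A =====
def nonrepetitive (s : String) : Bool :=
  let l := s.toList
  if l.length = 0 ∨ l.length = 1 then true
  else
    !((PySem.List.pyRange 0 (l.length : Int) 1).any fun i =>
      (PySem.List.pyRange 1 ((l.length : Int) + 1) 1).any fun c =>
        PySem.List.slice l (some i) (some (i + c)) ==
          PySem.List.slice l (some (i + c)) (some (2 * c + i)))

-- ===== PORT B =====
def altCheck (l : List Char) (d : Nat) : Bool :=
  -- one pass over k ∈ range(n-d): run = current streak of s[k]==s[k+d], best = max streak
  -- (indices are always in range, so List.getD is exact for Python's s[k])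
  let st := (List.range (l.length - d)).foldl
    (fun (st : Nat × Nat) k =>
      let run := if l.getD k ' ' == l.getD (k + d) ' ' then st.1 + 1 else 0
      (run, max st.2 run)) (0, 0)
  decide (d ≤ st.2)

def nonrepetitive_alt (s : String) : Bool :=
  let l := s.toList
  !((List.range (l.length / 2)).any fun d' => altCheck l (d' + 1))

-- ===== PRECONDITION & SPEC =====
def Spec_nonrepetitive (s : String) (out : Bool) : Prop := out = nonrepetitive_alt s
instance (s : String) (out : Bool) : Decidable (Spec_nonrepetitive s out) := by unfold Spec_nonrepetitive; infer_instance

-- ===== CLAIM (what is proved, stated in full; the proofs are below) =====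
def Claim_equal_nonrepetitive : Prop := ∀ (s : String), Dom_nonrepetitive s → Spec_nonrepetitive s (nonrepetitive s)

-- ===== LEMMAS AND PROOFS =====

-- The property both ports decide (negated): a square of half-length d starting at i.
def Sq (l : List Char) : Prop :=
  ∃ d i, 1 ≤ d ∧ i + 2 * d ≤ l.length ∧ ∀ t < d, l.getD (i + t) ' ' = l.getD (i + t + d) ' '

-- streak of matches ending at j; running maximum of streaks
def streakF (l : List Char) (d : Nat) : Nat → Nat
  | 0 => 0
  | j + 1 => if l.getD j ' ' == l.getD (j + d) ' ' then streakF l d j + 1 else 0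

def mstreakF (l : List Char) (d : Nat) : Nat → Nat
  | 0 => 0
  | j + 1 => max (mstreakF l d j) (streakF l d (j + 1))

lemma fold_eq_streak (l : List Char) (d m : Nat) :
    (List.range m).foldl
      (fun (st : Nat × Nat) k =>
        let run := if l.getD k ' ' == l.getD (k + d) ' ' then st.1 + 1 else 0
        (run, max st.2 run)) (0, 0) = (streakF l d m, mstreakF l d m) := by
  induction m with
  | zero => rfl
  | succ j ih =>
    rw [List.range_succ, List.foldl_append, ih]
    simp only [List.foldl_cons, List.foldl_nil, streakF, mstreakF]

lemma streak_ge_iff (l : List Char) (d : Nat) :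
    ∀ j r, r ≤ streakF l d j ↔
      r ≤ j ∧ ∀ i, i < j → j ≤ i + r → l.getD i ' ' = l.getD (i + d) ' ' := by
  intro j
  induction j with
  | zero => intro r; simp [streakF]
  | succ j ih =>
    intro r
    simp only [streakF]
    by_cases h : l.getD j ' ' = l.getD (j + d) ' '
    · simp only [h, beq_self_eq_true, if_true]
      cases r with
      | zero => constructor <;> intro <;> simp_all
      | succ r' =>
        rw [Nat.succ_le_succ_iff, ih r']
        constructor
        · rintro ⟨hr, hm⟩
          refine ⟨by omega, fun i hi hji => ?_⟩
          rcases Nat.lt_or_ge i j with hij | hij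
          · exact hm i hij (by omega)
          · have : i = j := by omega
            subst this; exact h
        · rintro ⟨hr, hm⟩
          exact ⟨by omega, fun i hi hji => hm i (by omega) (by omega)⟩
    · have hb : (l.getD j ' ' == l.getD (j + d) ' ') = false :=
        beq_eq_false_iff_ne.mpr h
      simp only [hb, Bool.false_eq_true, if_false]
      constructor
      · intro hr
        have : r = 0 := by omega
        subst this; exact ⟨by omega, fun i hi hji => by omega⟩
      · rintro ⟨hr, hm⟩
        by_contra hc
        have hr1 : 1 ≤ r := by omega
        exact h (hm j (by omega) (by omega))

lemma mstreak_ge_iff (l : List Char) (d : Nat) :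
    ∀ m, d ≤ mstreakF l d m ↔ ∃ j, j ≤ m ∧ d ≤ streakF l d j := by
  intro m
  induction m with
  | zero =>
    constructor
    · intro h; exact ⟨0, Nat.le_refl 0, h⟩
    · rintro ⟨j, hj, hs⟩
      have hj0 : j = 0 := Nat.le_zero.mp hj
      subst hj0; exact hs
  | succ j ih =>
    simp only [mstreakF]
    rw [le_max_iff, ih]
    constructor
    · rintro (⟨j1, hj1, hs⟩ | hs)
      · exact ⟨j1, by omega, hs⟩
      · exact ⟨j + 1, by omega, hs⟩
    · rintro ⟨j1, hj1, hs⟩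
      rcases Nat.lt_or_ge j1 (j + 1) with h | h
      · exact Or.inl ⟨j1, by omega, hs⟩
      · have hj : j1 = j + 1 := by omega
        exact Or.inr (hj ▸ hs)

lemma altCheck_iff (l : List Char) (d : Nat) (hd : 1 ≤ d) :
    altCheck l d = true ↔
      ∃ i, i + 2 * d ≤ l.length ∧ ∀ t < d, l.getD (i + t) ' ' = l.getD (i + t + d) ' ' := by
  unfold altCheck
  rw [fold_eq_streak]
  simp only [decide_eq_true_eq]
  rw [mstreak_ge_iff]
  constructor
  · rintro ⟨j, hj, hs⟩
    obtain ⟨hdj, hm⟩ := (streak_ge_iff l d j d).mp hs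
    have hdn : d ≤ l.length - d := le_trans hdj hj
    refine ⟨j - d, by omega, fun t ht => ?_⟩
    have := hm (j - d + t) (by omega) (by omega)
    exact this
  · rintro ⟨i, hlen, hm⟩
    refine ⟨i + d, by omega, (streak_ge_iff l d (i + d) d).mpr ⟨by omega, fun i' hi' hji' => ?_⟩⟩
    have ht := hm (i' - i) (by omega)
    have h2 : i + (i' - i) = i' := by omega
    rw [h2] at ht
    exact ht

lemma B_false_iff (s : String) : nonrepetitive_alt s = false ↔ Sq s.toList := by
  unfold nonrepetitive_alt
  simp only [Bool.not_eq_false', List.any_eq_true, List.mem_range]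
  constructor
  · rintro ⟨d', hd', hchk⟩
    obtain ⟨i, hlen, hm⟩ := (altCheck_iff _ _ (by omega)).mp hchk
    exact ⟨d' + 1, i, by omega, hlen, hm⟩
  · rintro ⟨d, i, hd, hlen, hm⟩
    refine ⟨d - 1, by omega, ?_⟩
    have hd1 : d - 1 + 1 = d := by omega
    rw [hd1]
    exact (altCheck_iff _ _ hd).mpr ⟨i, hlen, hm⟩

lemma slice_eq_iff (l : List Char) (a b : Nat) (ha : a < l.length) (hb : 1 ≤ b) :
    ((l.drop a).take b = (l.drop (a + b)).take b) ↔
      (a + 2 * b ≤ l.length ∧ ∀ t < b, l.getD (a + t) ' ' = l.getD (a + t + b) ' ') := by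
  constructor
  · intro h
    have hlen := congrArg List.length h
    simp only [List.length_take, List.length_drop] at hlen
    have h2b : a + 2 * b ≤ l.length := by
      rw [Nat.min_def, Nat.min_def] at hlen; split_ifs at hlen <;> omega
    refine ⟨h2b, fun t ht => ?_⟩
    have hg := congrArg (fun xs => List.getD xs t ' ') h
    simp only [List.getD_eq_getElem?_getD, List.getElem?_take_of_lt ht, List.getElem?_drop] at hg
    have hr : a + b + t = a + t + b := by omega
    rw [hr] at hg
    simpa only [List.getD_eq_getElem?_getD] using hg
  · rintro ⟨h2b, hm⟩
    apply List.ext_getElem?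
    intro t
    by_cases ht : t < b
    · rw [List.getElem?_take_of_lt ht, List.getElem?_take_of_lt ht,
        List.getElem?_drop, List.getElem?_drop]
      have hmt := hm t ht
      have e1 : l.getD (a + t) ' ' = l[a + t] := List.getD_eq_getElem l ' ' (by omega)
      have e2 : l.getD (a + t + b) ' ' = l[a + t + b] := List.getD_eq_getElem l ' ' (by omega)
      rw [e1, e2] at hmt
      rw [List.getElem?_eq_getElem (by omega : a + t < l.length),
        List.getElem?_eq_getElem (by omega : a + b + t < l.length)]
      have hr : a + b + t = a + t + b := by omega
      simp only [hr]
      exact congrArg some hmt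
    · rw [List.getElem?_take, List.getElem?_take]
      simp [ht]

lemma A_false_iff (s : String) : nonrepetitive s = false ↔ Sq s.toList := by
  unfold nonrepetitive
  by_cases h01 : s.toList.length = 0 ∨ s.toList.length = 1
  · rw [if_pos h01]
    constructor
    · intro h; cases h
    · rintro ⟨d, i, hd, hlen, -⟩
      rcases h01 with h | h <;> omega
  · rw [if_neg h01]
    simp only [Bool.not_eq_false', List.any_eq_true, PySem.List.mem_pyRange_one, beq_iff_eq]
    constructor
    · rintro ⟨i, ⟨hi0, hin⟩, c, ⟨hc1, hcn⟩, heq⟩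
      obtain ⟨a, rfl⟩ : ∃ a : Nat, (a : Int) = i := ⟨i.toNat, by omega⟩
      obtain ⟨b, rfl⟩ : ∃ b : Nat, (b : Int) = c := ⟨c.toNat, by omega⟩
      rw [PySem.List.slice_natCast_add] at heq
      have h2 : (2 * (b : Int) + a) = ((a + b : Nat) : Int) + ((b : Nat) : Int) := by
        push_cast; ring
      have h3 : ((a : Int) + b) = ((a + b : Nat) : Int) := by push_cast; ring
      rw [h2, h3, PySem.List.slice_natCast_add] at heq
      have ha : a < s.toList.length := by omega
      obtain ⟨hab, hm⟩ := (slice_eq_iff s.toList a b ha (by omega)).mp heq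
      exact ⟨b, a, by omega, hab, hm⟩
    · rintro ⟨d, i, hd, hlen, hm⟩
      refine ⟨(i : Int), ⟨by omega, by omega⟩, (d : Int), ⟨by omega, by omega⟩, ?_⟩
      rw [PySem.List.slice_natCast_add]
      have h2 : (2 * (d : Int) + i) = ((i + d : Nat) : Int) + ((d : Nat) : Int) := by
        push_cast; ring
      have h3 : ((i : Int) + d) = ((i + d : Nat) : Int) := by push_cast; ring
      rw [h2, h3, PySem.List.slice_natCast_add]
      exact (slice_eq_iff s.toList i d (by omega) hd).mpr ⟨hlen, hm⟩

-- ===== VERDICT (by name: the statement is the Claim_ definition above) =====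
theorem nonrepetitive_spec : Claim_equal_nonrepetitive := by
  intro s _
  unfold Spec_nonrepetitive
  have hA := A_false_iff s
  have hB := B_false_iff s
  cases h1 : nonrepetitive s <;> cases h2 : nonrepetitive_alt s <;> simp_all
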